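-- pv_equiv track=rewrite | github.com/Sridevi-Ch-14/Medical-Summary | extractor/pdf_extractor.py | _pre_clean_medical
-- ===== SOURCE A (Python) =====
-- def _pre_clean_medical(text: str) -> str:
--     """
--     Medical-specific pre-cleaning at the extraction level.
--     Removes interpretation blocks, control labels, and junk that would
--     confuse the downstream parser if left intact.
--
--     This runs BEFORE the parser's own noise filter for defense in depth.
--     """
--     # Remove entire INTERPRETATION blocks (header + following lines until next section/blank)
--     lines = text.split('\n')
--     result = []
--     skip = False
--
--     # Junk line markers specific to Indian labs (Medicover, SRL, Thyrocare)
--     junk_markers = [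
--         "INTERPRETATION", "Excellent Control", "Good Control", "Fair Control",
--         "Poor Control", "Near Optimal", "Derived from", "Normal : <",
--         "Normal : >", "Diabetic :", "Pre-Diabetic :", "Target :",
--     ]
--
--     for line in lines:
--         stripped = line.strip()
--
--         # Start of interpretation block
--         if stripped.upper() == "INTERPRETATION":
--             skip = True
--             continue
--
--         # End block on empty line or new section-like header
--         if skip:
--             if not stripped:
--                 skip = False
--                 result.append(line)
--             elif stripped.isupper() and not any(c.isdigit() for c in stripped) and len(stripped.split()) <= 4:
--                 skip = False
--                 result.append(line)
--             continue
--
--         # Remove individual junk lines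
--         if any(marker.lower() in stripped.lower() for marker in junk_markers):
--             continue
--
--         result.append(line)
--
--     return '\n'.join(result)
-- ===== SOURCE B (Python) =====
-- _JUNK_LOWER = [
--     "interpretation", "excellent control", "good control", "fair control",
--     "poor control", "near optimal", "derived from", "normal : <",
--     "normal : >", "diabetic :", "pre-diabetic :", "target :",
-- ]
--
--
-- def _is_interp(s):
--     return s.upper() == "INTERPRETATION"
--
--
-- def _is_terminator(s):
--     return (not s) or (s.isupper() and not any(c.isdigit() for c in s)
--                        and len(s.split()) <= 4)
--
--
-- def _is_junk(s):
--     low = s.lower()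
--     return any(m in low for m in _JUNK_LOWER)
--
--
-- def _pre_clean_medical(text: str) -> str:
--     # Index-based scan: an explicit inner loop consumes an INTERPRETATION
--     # block and appends its terminating line unfiltered; no persistent flag.
--     lines = text.split('\n')
--     out = []
--     i = 0
--     n = len(lines)
--     while i < n:
--         line = lines[i]
--         s = line.strip()
--         if _is_interp(s):
--             i += 1
--             while i < n and (_is_interp(lines[i].strip())
--                              or not _is_terminator(lines[i].strip())):
--                 i += 1
--             if i < n:
--                 out.append(lines[i])
--                 i += 1
--         elif _is_junk(s):
--             i += 1
--         else:
--             out.append(line)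
--             i += 1
--     return '\n'.join(out)
-- ===== Notes on version B (the rewrite author's own statement) =====
-- stated objective: alternative
-- what changed: Replaces A's single pass with a persistent skip flag by an explicit scan whose inner loop consumes an entire INTERPRETATION block at once (appending the terminating line unfiltered), with the junk markers pre-lowered once instead of lowered on every line.
import Mathlib
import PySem

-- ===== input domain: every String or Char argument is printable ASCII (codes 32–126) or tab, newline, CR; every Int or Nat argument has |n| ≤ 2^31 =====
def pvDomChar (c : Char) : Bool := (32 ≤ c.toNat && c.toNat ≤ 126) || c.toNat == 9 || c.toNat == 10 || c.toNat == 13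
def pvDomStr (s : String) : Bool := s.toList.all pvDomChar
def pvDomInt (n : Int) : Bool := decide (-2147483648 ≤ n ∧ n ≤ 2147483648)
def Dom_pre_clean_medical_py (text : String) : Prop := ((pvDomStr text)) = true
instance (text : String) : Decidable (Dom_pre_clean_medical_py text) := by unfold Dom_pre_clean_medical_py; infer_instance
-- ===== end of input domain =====

-- B replaces A's persistent `skip` flag by an index-style scan whose inner loop
-- consumes a whole INTERPRETATION block at once (objective: alternative decomposition).

-- str.isupper() for ASCII text: at least one cased char and no lowercase one
-- (exact on the ASCII domain, where cased = isalpha)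
def pvStrIsupper (s : List Char) : Bool :=
  s.any PySem.Chars.isalpha && !(s.any PySem.Chars.islower)

-- ===== PORT A =====
def pvJunkMarkersA : List (List Char) :=
  ["INTERPRETATION".toList, "Excellent Control".toList, "Good Control".toList,
   "Fair Control".toList, "Poor Control".toList, "Near Optimal".toList,
   "Derived from".toList, "Normal : <".toList, "Normal : >".toList,
   "Diabetic :".toList, "Pre-Diabetic :".toList, "Target :".toList]

def pvStepA (st : List (List Char) × Bool) (line : List Char) : List (List Char) × Bool :=
  let stripped := PySem.Chars.strip line
  if PySem.Chars.upper stripped == "INTERPRETATION".toList then (st.1, true)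
  else if st.2 then
    if stripped.isEmpty then (st.1 ++ [line], false)
    else if pvStrIsupper stripped && !(stripped.any PySem.Chars.isdigit)
            && decide ((PySem.Chars.split₀ stripped).length ≤ 4) then (st.1 ++ [line], false)
    else st
  else if pvJunkMarkersA.any
      (fun m => PySem.Chars.isIn (PySem.Chars.lower m) (PySem.Chars.lower stripped)) then st
  else (st.1 ++ [line], st.2)

def pre_clean_medical_py (text : String) : String :=
  let lines := PySem.Chars.splitOn text.toList "\n".toList
  String.ofList (PySem.Chars.join ['\n'] (lines.foldl pvStepA ([], false)).1)

-- ===== PORT B =====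
def pvJunkLower : List (List Char) :=
  ["interpretation".toList, "excellent control".toList, "good control".toList,
   "fair control".toList, "poor control".toList, "near optimal".toList,
   "derived from".toList, "normal : <".toList, "normal : >".toList,
   "diabetic :".toList, "pre-diabetic :".toList, "target :".toList]

def pvIsInterp (s : List Char) : Bool := PySem.Chars.upper s == "INTERPRETATION".toList

def pvIsTerminator (s : List Char) : Bool :=
  s.isEmpty || (pvStrIsupper s && !(s.any PySem.Chars.isdigit)
                && decide ((PySem.Chars.split₀ s).length ≤ 4))

def pvIsJunk (s : List Char) : Bool :=
  let low := PySem.Chars.lower s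
  pvJunkLower.any (fun m => PySem.Chars.isIn m low)

-- inner loop: drop lines while they restart or continue an INTERPRETATION block;
-- returns the remaining suffix, whose head (if any) is the terminating line
def pvSkipBlock : List (List Char) → List (List Char)
  | [] => []
  | l :: ls =>
    let t := PySem.Chars.strip l
    if pvIsInterp t then pvSkipBlock ls
    else if pvIsTerminator t then l :: ls
    else pvSkipBlock ls

theorem pvSkipBlock_len : ∀ ls, (pvSkipBlock ls).length ≤ ls.length := by
  intro ls
  induction ls with
  | nil => simp [pvSkipBlock]
  | cons l ls ih =>
    simp only [pvSkipBlock]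
    split_ifs <;> simp <;> omega

def pvCleanB : List (List Char) → List (List Char)
  | [] => []
  | line :: rest =>
    let s := PySem.Chars.strip line
    if pvIsInterp s then
      match h : pvSkipBlock rest with
      | [] => []
      | t :: rest' => t :: pvCleanB rest'
    else if pvIsJunk s then pvCleanB rest
    else line :: pvCleanB rest
termination_by ls => ls.length
decreasing_by
  · have := pvSkipBlock_len rest
    simp_all
    omega
  · simp
  · simp

def pre_clean_medical_py_alt (text : String) : String :=
  let lines := PySem.Chars.splitOn text.toList "\n".toList
  String.ofList (PySem.Chars.join ['\n'] (pvCleanB lines))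

-- ===== PRECONDITION & SPEC =====
def Spec_pre_clean_medical_py (text : String) (out : String) : Prop := out = pre_clean_medical_py_alt text
instance (text : String) (out : String) : Decidable (Spec_pre_clean_medical_py text out) := by unfold Spec_pre_clean_medical_py; infer_instance

-- ===== CLAIM (what is proved, stated in full; the proofs are below) =====
def Claim_equal_pre_clean_medical_py : Prop := ∀ (text : String), Dom_pre_clean_medical_py text → Spec_pre_clean_medical_py text (pre_clean_medical_py text)

-- ===== LEMMAS AND PROOFS =====

-- A's per-line marker lowering equals B's pre-lowered marker list
theorem pvJunk_eq (s : List Char) :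
    (pvJunkMarkersA.any
      (fun m => PySem.Chars.isIn (PySem.Chars.lower m) (PySem.Chars.lower s))) = pvIsJunk s := by
  have h : pvJunkMarkersA.map PySem.Chars.lower = pvJunkLower := by decide
  unfold pvIsJunk
  rw [← h, List.any_map]
  rfl

-- A's fold with skip = true computes the block-skipping then continues like B
theorem pvFold_eq : ∀ (lines : List (List Char)),
    (∀ acc, (lines.foldl pvStepA (acc, false)).1 = acc ++ pvCleanB lines) ∧
    (∀ acc, (lines.foldl pvStepA (acc, true)).1 =
      acc ++ (match pvSkipBlock lines with
              | [] => []
              | t :: rest' => t :: pvCleanB rest')) := by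
  intro lines
  induction lines with
  | nil => constructor <;> intro acc <;> simp [pvCleanB, pvSkipBlock]
  | cons line rest ih =>
    obtain ⟨ih1, ih2⟩ := ih
    constructor <;> intro acc
    · by_cases h1 : pvIsInterp (PySem.Chars.strip line)
      · unfold pvIsInterp at h1
        simp only [List.foldl_cons, pvStepA, h1, if_true]
        rw [ih2 acc]
        simp only [pvCleanB, pvIsInterp, h1, if_true]
        rcases hs : pvSkipBlock rest with _ | ⟨t, r⟩ <;> simp [hs]
      · have h1' : (PySem.Chars.upper (PySem.Chars.strip line)
            == "INTERPRETATION".toList) = false := by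
          unfold pvIsInterp at h1; simpa using h1
        by_cases h2 : pvIsJunk (PySem.Chars.strip line)
        · simp only [List.foldl_cons, pvStepA, h1', Bool.false_eq_true, if_false,
            pvJunk_eq, h2, if_true]
          rw [ih1 acc]
          simp only [pvCleanB, pvIsInterp, h1', Bool.false_eq_true, if_false, h2, if_true]
        · simp only [List.foldl_cons, pvStepA, h1', Bool.false_eq_true, if_false,
            pvJunk_eq, h2]
          rw [ih1 (acc ++ [line])]
          simp only [pvCleanB, pvIsInterp, h1', Bool.false_eq_true, if_false, h2,
            List.append_assoc, List.singleton_append]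
    · by_cases h1 : pvIsInterp (PySem.Chars.strip line)
      · unfold pvIsInterp at h1
        simp only [List.foldl_cons, pvStepA, h1, if_true]
        rw [ih2 acc]
        simp only [pvSkipBlock, pvIsInterp, h1, if_true]
      · have h1' : (PySem.Chars.upper (PySem.Chars.strip line)
            == "INTERPRETATION".toList) = false := by
          unfold pvIsInterp at h1; simpa using h1
        by_cases h2 : pvIsTerminator (PySem.Chars.strip line)
        · have hfold : (pvStepA (acc, true) line) = (acc ++ [line], false) := by
            unfold pvIsTerminator at h2
            simp only [pvStepA, h1', Bool.false_eq_true, if_false]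
            rcases Bool.or_eq_true_iff.mp h2 with he | hh
            · simp [he]
            · by_cases he : (PySem.Chars.strip line).isEmpty <;> simp [he, hh]
          simp only [List.foldl_cons, hfold]
          rw [ih1 (acc ++ [line])]
          simp only [pvSkipBlock, pvIsInterp, h1', Bool.false_eq_true, if_false, h2, if_true,
            List.append_assoc, List.singleton_append]
        · have hfold : (pvStepA (acc, true) line) = (acc, true) := by
            unfold pvIsTerminator at h2
            simp only [Bool.or_eq_true_iff, not_or] at h2
            simp [pvStepA, h2.1, h2.2]
          simp only [List.foldl_cons, hfold]
          rw [ih2 acc]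
          simp only [pvSkipBlock, pvIsInterp, h1', Bool.false_eq_true, if_false, h2]

theorem pre_clean_medical_py_spec : Claim_equal_pre_clean_medical_py := by
  intro text _
  unfold Spec_pre_clean_medical_py pre_clean_medical_py pre_clean_medical_py_alt
  simp only
  rw [(pvFold_eq _).1 []]
  simp
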